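-- pv_equiv track=rewrite | github.com/AlStorm/RobberLanguage | main.py | robberDecode
-- ===== SOURCE A (Python) =====
-- vowels = ["a", "A", "e", "E", "i", "I", "o", "O", "u", "U", "y", "Y", "ä", "Ä", "ö", "Ö", "å", "Å", "'", "!", " ", ".", "," "?"]
--
-- def robberDecode(code):
--     solution = ''
--     codeIndex = 0
--     while codeIndex < len(code):
--         solution += code[codeIndex]
--         if code[codeIndex] in vowels:
--             codeIndex += 1
--         else:
--             codeIndex += 3
--     return solution
-- ===== SOURCE B (Python) =====
-- vowels = ["a", "A", "e", "E", "i", "I", "o", "O", "u", "U", "y", "Y", "ä", "Ä", "ö", "Ö", "å", "Å", "'", "!", " ", ".", "," "?"]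
--
-- _single = frozenset(v for v in vowels if len(v) == 1)
--
-- # Divide and conquer over halves: each piece of the input is summarised by a
-- # transfer table mapping the incoming skip state (0, 1 or 2 characters still
-- # to drop) to (emitted text, outgoing skip state); tables of adjacent pieces
-- # compose, and the answer is the whole string's table applied to skip 0.
-- # Only the length-1 entries of the vowels list pass through, so the
-- # concatenated ",?" element stays excluded, as in the source list.
-- def _table(s):
--     if len(s) <= 1:
--         if not s:
--             return (('', 0), ('', 1), ('', 2))
--         ch = s[0]
--         return ((ch, 0 if ch in _single else 2), ('', 0), ('', 1))
--     m = len(s) // 2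
--     t1, t2 = _table(s[:m]), _table(s[m:])
--     def comp(k):
--         o1, k1 = t1[k]
--         o2, k2 = t2[k1]
--         return (o1 + o2, k2)
--     return (comp(0), comp(1), comp(2))
--
-- def robberDecode(code):
--     return _table(code)[0][0]
-- ===== Notes on version B (the rewrite author's own statement) =====
-- stated objective: alternative
-- what changed: Replaces the sequential index-jumping while loop with a divide-and-conquer that summarises each half of the input as a transfer table from incoming skip state (0/1/2) to (emitted text, outgoing skip state) and composes the tables, applying the whole string's table to skip 0.
import Mathlib
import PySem

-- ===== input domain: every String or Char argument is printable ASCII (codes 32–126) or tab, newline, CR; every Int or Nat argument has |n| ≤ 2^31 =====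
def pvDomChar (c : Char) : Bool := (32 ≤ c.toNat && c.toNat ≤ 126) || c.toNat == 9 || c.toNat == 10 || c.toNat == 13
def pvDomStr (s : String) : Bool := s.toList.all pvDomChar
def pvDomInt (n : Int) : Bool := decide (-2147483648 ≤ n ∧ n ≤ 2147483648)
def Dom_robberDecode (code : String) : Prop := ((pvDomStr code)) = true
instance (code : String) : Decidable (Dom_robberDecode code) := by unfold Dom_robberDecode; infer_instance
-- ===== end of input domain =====

-- B replaces A's sequential index-jumping loop by a divide-and-conquer over halves that
-- composes transfer tables from incoming skip state to (emitted text, outgoing skip state).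

-- ===== PORT A =====
-- the module-level vowels list (note the concatenated ",?" literal, kept verbatim)
def vowelsA : List String :=
  ["a", "A", "e", "E", "i", "I", "o", "O", "u", "U", "y", "Y",
   "ä", "Ä", "ö", "Ö", "å", "Å", "'", "!", " ", ".", ",?"]

-- the while loop: codeIndex-indexed recursion accumulating 'solution'
def robberLoopA (cs : List Char) (codeIndex : Nat) (solution : List Char) : List Char :=
  if _h : codeIndex < cs.length then
    let c := cs[codeIndex]
    if vowelsA.contains (String.ofList [c]) then
      robberLoopA cs (codeIndex + 1) (solution ++ [c])
    else
      robberLoopA cs (codeIndex + 3) (solution ++ [c])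
  else solution
termination_by cs.length - codeIndex

def robberDecode (code : String) : String :=
  String.ofList (robberLoopA code.toList 0 [])

-- ===== PORT B =====
-- frozenset(v for v in vowels if len(v) == 1) (a 1-char Python string is a Char here)
def singleVowels : PySem.Set Char :=
  PySem.Set.ofList (vowelsA.filterMap (fun v => match v.toList with | [c] => some c | _ => none))

-- _table: a triple of (emitted text, outgoing skip) indexed by the incoming skip 0/1/2
def tableB (l : List Char) : (List Char × Nat) × (List Char × Nat) × (List Char × Nat) :=
  if _h : l.length ≤ 1 then
    match l with
    | [] => (([], 0), ([], 1), ([], 2))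
    | c :: _ => (([c], if PySem.Set.contains singleVowels c then 0 else 2), ([], 0), ([], 1))
  else
    let m := l.length / 2
    let t1 := tableB (l.take m)
    let t2 := tableB (l.drop m)
    let comp := fun (k : Nat) =>
      let p1 := if k = 0 then t1.1 else if k = 1 then t1.2.1 else t1.2.2
      let p2 := if p1.2 = 0 then t2.1 else if p1.2 = 1 then t2.2.1 else t2.2.2
      (p1.1 ++ p2.1, p2.2)
    (comp 0, comp 1, comp 2)
termination_by l.length
decreasing_by
  · simp only [List.length_take]; omega
  · simp only [List.length_drop]; omega

def robberDecode_alt (code : String) : String :=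
  String.ofList (tableB code.toList).1.1

-- ===== PRECONDITION & SPEC =====
def Spec_robberDecode (code : String) (out : String) : Prop := out = robberDecode_alt code
instance (code : String) (out : String) : Decidable (Spec_robberDecode code out) := by unfold Spec_robberDecode; infer_instance

-- ===== CLAIM (what is proved, stated in full; the proofs are below) =====
def Claim_equal_robberDecode : Prop := ∀ (code : String), Dom_robberDecode code → Spec_robberDecode code (robberDecode code)

-- ===== LEMMAS AND PROOFS =====

-- sequential reference decoder carrying the skip state
def run1 : List Char → Nat → List Char × Nat
  | [], s => ([], s)
  | _ :: r, s + 1 => run1 r s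
  | c :: r, 0 =>
    let p := run1 r (if PySem.Set.contains singleVowels c then 0 else 2)
    (c :: p.1, p.2)

-- indexing a table the way comp does
def idx3 (t : (List Char × Nat) × (List Char × Nat) × (List Char × Nat)) (k : Nat) :
    List Char × Nat :=
  if k = 0 then t.1 else if k = 1 then t.2.1 else t.2.2

theorem run1_append (l1 l2 : List Char) (s : Nat) :
    run1 (l1 ++ l2) s =
      ((run1 l1 s).1 ++ (run1 l2 (run1 l1 s).2).1, (run1 l2 (run1 l1 s).2).2) := by
  induction l1 generalizing s with
  | nil => simp [run1]
  | cons c r ih =>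
    cases s with
    | zero => simp [run1, ih]
    | succ s => simpa [run1] using ih s

theorem run1_skip_le (l : List Char) (s : Nat) (hs : s ≤ 2) : (run1 l s).2 ≤ 2 := by
  induction l generalizing s with
  | nil => simpa [run1] using hs
  | cons c r ih =>
    cases s with
    | zero =>
      simp only [run1]
      exact ih _ (by split <;> omega)
    | succ s => exact ih s (by omega)

theorem run1_fst_drop (s : Nat) : ∀ (l : List Char), (run1 l s).1 = (run1 (l.drop s) 0).1 := by
  induction s with
  | zero => simp
  | succ s ih =>
    intro l
    cases l with
    | nil => simp [run1]
    | cons c r => simpa [run1] using ih r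

theorem vowel_eq (c : Char) :
    vowelsA.contains (String.ofList [c]) = PySem.Set.contains singleVowels c := by
  have hmk : ∀ d : Char, (String.ofList [c] == String.ofList [d]) = (c == d) := by
    intro d
    by_cases h : c = d
    · subst h; simp
    · have hne : String.ofList [c] ≠ String.ofList [d] := by
        intro hs
        have := congrArg String.toList hs
        simp [String.toList_ofList] at this
        exact h this
      simp [beq_eq_false_iff_ne.mpr hne, beq_eq_false_iff_ne.mpr h]
  have hne : (String.ofList [c] == ",?") = false := by
    apply beq_eq_false_iff_ne.mpr
    intro hs
    have := congrArg String.toList hs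
    simp [String.toList_ofList] at this
  have hs : singleVowels = ['a','A','e','E','i','I','o','O','u','U','y','Y','ä','Ä','ö','Ö','å','Å','\'','!',' ','.'] := by decide
  rw [hs]
  simp only [vowelsA, List.contains_cons, List.contains_nil,
    show (",?" : String) = String.ofList [',', '?'] from rfl,
    show ("a" : String) = String.ofList ['a'] from rfl, show ("A" : String) = String.ofList ['A'] from rfl,
    show ("e" : String) = String.ofList ['e'] from rfl, show ("E" : String) = String.ofList ['E'] from rfl,
    show ("i" : String) = String.ofList ['i'] from rfl, show ("I" : String) = String.ofList ['I'] from rfl,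
    show ("o" : String) = String.ofList ['o'] from rfl, show ("O" : String) = String.ofList ['O'] from rfl,
    show ("u" : String) = String.ofList ['u'] from rfl, show ("U" : String) = String.ofList ['U'] from rfl,
    show ("y" : String) = String.ofList ['y'] from rfl, show ("Y" : String) = String.ofList ['Y'] from rfl,
    show ("ä" : String) = String.ofList ['ä'] from rfl, show ("Ä" : String) = String.ofList ['Ä'] from rfl,
    show ("ö" : String) = String.ofList ['ö'] from rfl, show ("Ö" : String) = String.ofList ['Ö'] from rfl,
    show ("å" : String) = String.ofList ['å'] from rfl, show ("Å" : String) = String.ofList ['Å'] from rfl,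
    show ("'" : String) = String.ofList ['\''] from rfl, show ("!" : String) = String.ofList ['!'] from rfl,
    show (" " : String) = String.ofList [' '] from rfl, show ("." : String) = String.ofList ['.'] from rfl,
    hmk, hne, PySem.Set.contains]
  simp

theorem loopA_eq_run1 : ∀ (cs : List Char) (i : Nat) (sol : List Char),
    robberLoopA cs i sol = sol ++ (run1 (cs.drop i) 0).1 := by
  intro cs i
  induction hn : cs.length - i using Nat.strong_induction_on generalizing i with
  | _ n ih =>
    intro sol
    rw [robberLoopA]
    by_cases h : i < cs.length
    · have hdrop : cs.drop i = cs[i] :: cs.drop (i + 1) :=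
        (List.drop_eq_getElem_cons h)
      by_cases hv : vowelsA.contains (String.ofList [cs[i]]) = true
      · rw [dif_pos h, if_pos hv,
          ih (cs.length - (i + 1)) (by omega) (i + 1) rfl]
        have hm : PySem.Set.contains singleVowels cs[i] = true := by rw [← vowel_eq]; exact hv
        have hm' : cs[i] ∈ singleVowels := by simpa [PySem.Set.contains] using hm
        rw [hdrop]
        simp [run1, hm']
      · rw [dif_pos h, if_neg hv,
          ih (cs.length - (i + 3)) (by omega) (i + 3) rfl]
        have hc : PySem.Set.contains singleVowels cs[i] = false := by
          rw [← vowel_eq]; exact eq_false_of_ne_true hv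
        have hm' : cs[i] ∉ singleVowels := by simpa [PySem.Set.contains] using hc
        rw [hdrop]
        simp only [run1, hc, Bool.false_eq_true, if_false]
        rw [run1_fst_drop 2 (cs.drop (i + 1)), List.drop_drop]
        simp [List.append_assoc]
    · rw [dif_neg h, List.drop_of_length_le (by omega)]
      simp [run1]

theorem tableB_eq_run1 : ∀ (l : List Char) (k : Nat), k ≤ 2 → idx3 (tableB l) k = run1 l k := by
  intro l
  induction hn : l.length using Nat.strong_induction_on generalizing l with
  | _ n ih =>
    intro k hk
    by_cases h : l.length ≤ 1
    · rw [tableB, dif_pos h]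
      match l with
      | [] => interval_cases k <;> simp [idx3, run1]
      | [c] => interval_cases k <;> simp [idx3, run1]
      | _ :: _ :: _ => simp at h
    · simp only [not_le] at h
      have hm1 : l.length / 2 < l.length := by omega
      have hm0 : 1 ≤ l.length / 2 := by omega
      have ht1 : ∀ k', k' ≤ 2 → idx3 (tableB (l.take (l.length / 2))) k' = run1 (l.take (l.length / 2)) k' := by
        intro k' hk'
        exact ih (l.take (l.length / 2)).length (by simp [List.length_take]; omega) _ rfl k' hk'
      have ht2 : ∀ k', k' ≤ 2 → idx3 (tableB (l.drop (l.length / 2))) k' = run1 (l.drop (l.length / 2)) k' := by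
        intro k' hk'
        exact ih (l.drop (l.length / 2)).length (by simp; omega) _ rfl k' hk'
      have hsplit : l.take (l.length / 2) ++ l.drop (l.length / 2) = l := List.take_append_drop _ _
      have hrun : run1 l k =
          ((run1 (l.take (l.length / 2)) k).1 ++
            (run1 (l.drop (l.length / 2)) (run1 (l.take (l.length / 2)) k).2).1,
           (run1 (l.drop (l.length / 2)) (run1 (l.take (l.length / 2)) k).2).2) := by
        conv_lhs => rw [← hsplit]
        exact run1_append _ _ k
      have hskip : (run1 (l.take (l.length / 2)) k).2 ≤ 2 := run1_skip_le _ k hk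
      have h1 := ht1 k hk
      have h2 := ht2 _ hskip
      -- unfold comp at the given index
      have hidx : idx3 (tableB l) k =
          (let p1 := idx3 (tableB (l.take (l.length / 2))) k
           let p2 := idx3 (tableB (l.drop (l.length / 2))) p1.2
           (p1.1 ++ p2.1, p2.2)) := by
        rw [tableB, dif_neg (by omega)]
        interval_cases k <;> simp [idx3]
      rw [hidx]
      simp only [h1]
      rw [ht2 _ hskip, hrun]
  
-- ===== VERDICT (by name: the statement is the Claim_ definition above) =====
theorem robberDecode_spec : Claim_equal_robberDecode := by
  intro code _
  show robberDecode code = robberDecode_alt code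
  unfold robberDecode robberDecode_alt
  have ht : idx3 (tableB code.toList) 0 = run1 code.toList 0 := tableB_eq_run1 code.toList 0 (by omega)
  have : (tableB code.toList).1 = run1 code.toList 0 := by simpa [idx3] using ht
  rw [loopA_eq_run1, List.drop_zero, List.nil_append, this]
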